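-- pv_equiv track=rewrite | github.com/yrrah2/WorldCitiesOverTime | test.py | latest
-- ===== SOURCE A (Python) =====
-- def latest(times, regimes, pivot):
--     if times[0] > pivot:
--         return None
--     i = 0
--     for time in times:
--         if time <= pivot:
--             i += 1
--         else:
--             break
--     return regimes[i-1]
-- ===== SOURCE B (Python) =====
-- def latest(times, regimes, pivot):
--     # Divide and conquer: the leading run of times <= pivot is computed by
--     # splitting the index range in half; the right half is consulted only
--     # when the left half's run is complete (reaches the whole left half).
--     def run(lo, hi):
--         # length of the maximal all-<=pivot prefix of times[lo:hi]
--         if hi - lo <= 1: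
--             return 1 if lo < hi and times[lo] <= pivot else 0
--         mid = (lo + hi) // 2
--         left = run(lo, mid)
--         if left < mid - lo:
--             return left
--         return (mid - lo) + run(mid, hi)
--     i = run(0, len(times))
--     return regimes[i - 1] if i else None
-- ===== Notes on version B (the rewrite author's own statement) =====
-- stated objective: alternative
-- what changed: B computes the length of the leading run of times <= pivot by a short-circuiting divide-and-conquer recursion on index ranges (descending into the right half only when the left half's run is complete) instead of A's left-to-right counter loop with break, and derives both the None case and the indexing from that one count.
-- outside the precondition, e.g. on latest([], [], 0): A raises IndexError, B returns None; on latest([1, 2], [7], 5): A raises IndexError, B raises IndexError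
import Mathlib
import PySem

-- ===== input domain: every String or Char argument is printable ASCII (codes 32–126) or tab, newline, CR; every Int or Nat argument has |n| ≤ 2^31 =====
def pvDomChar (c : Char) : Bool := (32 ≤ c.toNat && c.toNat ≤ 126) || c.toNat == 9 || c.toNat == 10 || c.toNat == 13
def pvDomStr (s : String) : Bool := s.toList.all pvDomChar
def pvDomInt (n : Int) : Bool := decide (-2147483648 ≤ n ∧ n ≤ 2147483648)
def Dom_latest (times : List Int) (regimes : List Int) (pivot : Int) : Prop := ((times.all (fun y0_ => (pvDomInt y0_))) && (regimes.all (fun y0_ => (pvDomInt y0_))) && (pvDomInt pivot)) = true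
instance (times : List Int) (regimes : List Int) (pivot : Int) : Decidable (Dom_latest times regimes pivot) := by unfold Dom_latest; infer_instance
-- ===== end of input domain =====

-- B computes the leading run of times ≤ pivot by a short-circuiting divide-and-conquer
-- recursion on index ranges instead of A's left-to-right counter loop with break
-- (objective: alternative; equivalence proved on Pre_latest, the inputs where A returns).

-- ===== PORT A =====
-- the 'for time in times' loop with counter i and break
def latestLoopA (ts : List Int) (pivot : Int) (i : Int) : Int :=
  match ts with
  | [] => i
  | t :: rest => if t ≤ pivot then latestLoopA rest pivot (i + 1) else i

def latest (times : List Int) (regimes : List Int) (pivot : Int) : Option Int :=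
  match PySem.List.pyGet? times 0 with
  | none => none  -- IndexError on times[0]; excluded by Pre_latest
  | some t0 =>
    if t0 > pivot then none
    else
      -- regimes[i-1]; an out-of-range index (IndexError) is excluded by Pre_latest
      PySem.List.pyGet? regimes (latestLoopA times pivot 0 - 1)

-- ===== PORT B =====
-- Source B's 'run(lo, hi)'; the locals 'mid = (lo + hi) // 2' and 'left = run(lo, mid)' are
-- written inline, and the structural fuel (one unit per level; the range at least halves
-- each level, so 'len times' units never run out) only makes the recursion total
def dcRun (times : List Int) (pivot : Int) : Nat → Int → Int → Int
  | 0, _, _ => 0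
  | fuel + 1, lo, hi =>
    if hi - lo ≤ 1 then
      if lo < hi then
        match PySem.List.pyGet? times lo with
        | some t => if t ≤ pivot then 1 else 0
        | none => 0  -- unreachable when 0 ≤ lo < hi ≤ len times (IndexError in Python)
      else 0
    else
      if dcRun times pivot fuel lo (PySem.Int.floordiv (lo + hi) 2) <
          PySem.Int.floordiv (lo + hi) 2 - lo then
        dcRun times pivot fuel lo (PySem.Int.floordiv (lo + hi) 2)
      else
        (PySem.Int.floordiv (lo + hi) 2 - lo) +
          dcRun times pivot fuel (PySem.Int.floordiv (lo + hi) 2) hi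

def latest_alt (times : List Int) (regimes : List Int) (pivot : Int) : Option Int :=
  let i := dcRun times pivot times.length 0 (times.length : Int)
  if i = 0 then none
  else PySem.List.pyGet? regimes (i - 1)  -- IndexError excluded by Pre_latest

-- ===== PRECONDITION & SPEC =====
-- Pre_latest excludes exactly the inputs on which A raises IndexError: empty times
-- (times[0]), and a leading run of times ≤ pivot longer than regimes (regimes[i-1]).
def Pre_latest (times : List Int) (regimes : List Int) (pivot : Int) : Prop :=
  times ≠ [] ∧ (times.headD 0 ≤ pivot →
    (times.takeWhile (fun t => decide (t ≤ pivot))).length ≤ regimes.length)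
instance (times : List Int) (regimes : List Int) (pivot : Int) : Decidable (Pre_latest times regimes pivot) := by unfold Pre_latest; infer_instance

def pvWitness_latest : List Int × List Int × Int := ([0, 3], [7, 8], 1)

def Spec_latest (times : List Int) (regimes : List Int) (pivot : Int) (out : Option Int) : Prop := out = latest_alt times regimes pivot
instance (times : List Int) (regimes : List Int) (pivot : Int) (out : Option Int) : Decidable (Spec_latest times regimes pivot out) := by unfold Spec_latest; infer_instance

-- ===== CLAIM (what is proved, stated in full; the proofs are below) =====
def Claim_equal_latest : Prop := ∀ (times : List Int) (regimes : List Int) (pivot : Int), Dom_latest times regimes pivot → Pre_latest times regimes pivot → Spec_latest times regimes pivot (latest times regimes pivot)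

-- ===== LEMMAS AND PROOFS =====

-- A's loop counts the leading run of times ≤ pivot
theorem latestLoopA_eq (pivot : Int) :
    ∀ (ts : List Int) (i : Int),
      latestLoopA ts pivot i = i + ((ts.takeWhile (fun t => decide (t ≤ pivot))).length : Int) := by
  intro ts
  induction ts with
  | nil => intro i; simp [latestLoopA]
  | cons t rest ih =>
      intro i
      by_cases h : t ≤ pivot
      · simp [latestLoopA, h, ih]; omega
      · simp [latestLoopA, h]

-- the run length of a concatenation: the left part's run, continued into the right
-- part exactly when it spans the whole left part
theorem takeWhile_length_append (p : Int → Bool) :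
    ∀ (xs ys : List Int),
      ((xs ++ ys).takeWhile p).length =
        if (xs.takeWhile p).length < xs.length then (xs.takeWhile p).length
        else xs.length + ((ys.takeWhile p).length) := by
  intro xs
  induction xs with
  | nil => intro ys; simp
  | cons x xs ih =>
      intro ys
      by_cases h : p x
      · simp only [List.cons_append, List.takeWhile_cons, h, if_true, List.length_cons]
        rw [ih ys]
        split_ifs with h1 h2 h3 <;> omega
      · simp [List.takeWhile_cons, h]

-- dcRun on the range [lo, hi) computes the run length of the segment times[lo:hi]
theorem dcRun_eq (times : List Int) (pivot : Int) :
    ∀ (fuel : Nat) (lo hi : Int), (hi - lo).toNat ≤ fuel → 0 ≤ lo → lo ≤ hi →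
      hi ≤ (times.length : Int) →
      dcRun times pivot fuel lo hi =
        ((((times.drop lo.toNat).take (hi - lo).toNat).takeWhile
            (fun t => decide (t ≤ pivot))).length : Int) := by
  intro fuel
  induction fuel with
  | zero =>
      intro lo hi hn h0 hlh hlen
      have he : hi = lo := by omega
      simp [dcRun, he]
  | succ n ih =>
      intro lo hi hn h0 hlh hlen
      rw [dcRun]
      by_cases hsmall : hi - lo ≤ 1
      · rw [if_pos hsmall]
        by_cases hlt : lo < hi
        · rw [if_pos hlt]
          have h1 : (hi - lo).toNat = 1 := by omega
          have hlo : lo.toNat < times.length := by omega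
          have hget : PySem.List.pyGet? times lo = times[lo.toNat]? := by
            rw [show lo = ((lo.toNat : Nat) : Int) by omega, PySem.List.pyGet?_natCast]
            congr 1
          rw [hget, List.getElem?_eq_getElem hlo]
          simp only
          have hseg : (times.drop lo.toNat).take (hi - lo).toNat = [times[lo.toNat]] := by
            rw [h1]
            rw [List.take_one, List.head?_drop]
            simp [List.getElem?_eq_getElem hlo]
          rw [hseg]
          by_cases ht : times[lo.toNat] ≤ pivot
          · simp [ht, List.takeWhile_cons]
          · simp [ht, List.takeWhile_cons]
        · rw [if_neg hlt]
          have he : hi = lo := by omega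
          simp [he]
      · rw [if_neg hsmall]
        have hmid := PySem.Int.floordiv_two_mid_bounds (by omega : lo ≤ hi)
        have hmidlt : PySem.Int.floordiv (lo + hi) 2 < hi := by
          rw [PySem.Int.floordiv_eq_ediv_of_pos (by omega)]; omega
        have hmidgt : lo < PySem.Int.floordiv (lo + hi) 2 := by
          rw [PySem.Int.floordiv_eq_ediv_of_pos (by omega)]; omega
        set mid := PySem.Int.floordiv (lo + hi) 2 with hm
        have hL := ih lo mid (by omega) h0 (by omega) (by omega)
        have hR := ih mid hi (by omega) (by omega) (by omega) hlen
        have hsplit : (times.drop lo.toNat).take (hi - lo).toNat =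
            (times.drop lo.toNat).take (mid - lo).toNat ++
              (times.drop mid.toNat).take (hi - mid).toNat := by
          rw [show (hi - lo).toNat = (mid - lo).toNat + (hi - mid).toNat by omega,
            List.take_add]
          congr 1
          rw [List.drop_drop]
          congr 1
          congr 1
          omega
        have hLlen : ((times.drop lo.toNat).take (mid - lo).toNat).length = (mid - lo).toNat := by
          rw [List.length_take, List.length_drop]
          omega
        rw [hL, hR, hsplit, takeWhile_length_append]
        rw [hLlen]
        push_cast
        split_ifs with h1 h2 h3 <;> omega

-- ===== VERDICT (by name: the statement is the Claim_ definition above) =====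
theorem latest_spec : Claim_equal_latest := by
  intro times regimes pivot _dom hpre
  unfold Spec_latest
  obtain ⟨hne, hlen⟩ := hpre
  have hdc : dcRun times pivot times.length 0 (times.length : Int) =
      (((times.takeWhile (fun t => decide (t ≤ pivot))).length : Nat) : Int) := by
    rw [dcRun_eq times pivot times.length 0 (times.length : Int)
      (by omega) (by omega) (by omega) (by omega)]
    simp
  cases times with
  | nil => exact absurd rfl hne
  | cons t ts =>
      simp only [List.headD_cons] at hlen
      simp only [latest, latest_alt, PySem.List.pyGet?_zero_cons, hdc]
      by_cases h : t ≤ pivot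
      · have hC1 : 1 ≤ ((t :: ts).takeWhile (fun t => decide (t ≤ pivot))).length := by
          simp only [List.takeWhile_cons, h, decide_true, if_true, List.length_cons]
          omega
        rw [if_neg (by omega), if_neg (by exact_mod_cast
          (by omega : ¬ ((t :: ts).takeWhile (fun t => decide (t ≤ pivot))).length = 0))]
        rw [latestLoopA_eq]
        norm_num
      · have hC0 : ((t :: ts).takeWhile (fun t => decide (t ≤ pivot))).length = 0 := by
          simp [List.takeWhile_cons, h]
        rw [if_pos (by omega), if_pos (by simp [hC0])]
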